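-- pv_equiv track=rewrite | github.com/PTyCCa/python_lists | challenges/piggy_bank.py | visualize_old
-- ===== SOURCE A (Python) =====
-- from collections import Counter
--
-- def visualize_old(coins, bar_char='₽'):  # noqa: WPS210
--     """Visualize money in a money box."""
--     # BEGIN (write your solution here)
--     vc = Counter()
--     for coin in coins:
--         vc[coin] += 1
--     sorted_coin_denom = dict(enumerate(sorted(vc.keys())))
--     matrix_graph = []
--     for i in range(max(vc.values()) + 1):
--         matrix_graph.append([0] * len(vc.keys()))
--     for i, den in sorted_coin_denom.items():
--         for de, s in vc.items():
--             if den == de: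
--                 matrix_graph[abs(max(vc.values()) - s)][i] = s
--     matrix_width = len(vc.keys())
--     first = 0
--     for i in range(matrix_width):
--         for row in matrix_graph:
--             if row[i] == first:
--                 row[i] = '  '
--             elif row[i] > first:
--                 first = row[i]
--                 row[i] = str(row[i]) + " "
--             elif row[i] < first:
--                 row[i] = bar_char * 2
--         first = 0
--     result_string = ''
--     dot_line = ''
--     for i in matrix_graph:
--         dot_line = len(' '.join(i)) * '-'
--         result_string += ' '.join(i) + '\n'
--     result_string += dot_line + '\n'
--     end = list(str(x) for x in sorted_coin_denom.values())
--     formated_last_string = []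
--     for i in end:
--         if len(i) < 2:
--             formated_last_string.append(i + ' ')
--         else:
--             formated_last_string.append(i)
--     result_string += ' '.join(formated_last_string)
--     return result_string
-- ===== SOURCE B (Python) =====
-- from collections import Counter
--
-- def visualize_old(coins, bar_char='₽'):
--     """Visualize money in a money box."""
--     counts = Counter(coins)
--     denoms = sorted(counts)
--     max_count = max(counts.values())
--     columns = []
--     for den in denoms:
--         s = counts[den]
--         columns.append(['  '] * (max_count - s) + [str(s) + ' '] + [bar_char * 2] * s)
--     rows = [' '.join(cells) for cells in zip(*columns)]
--     body = ''.join(row + '\n' for row in rows)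
--     dash_line = '-' * len(rows[-1])
--     labels = [str(d) + ' ' if len(str(d)) < 2 else str(d) for d in denoms]
--     return body + dash_line + '\n' + ' '.join(labels)
-- ===== Notes on version B (the rewrite author's own statement) =====
-- stated objective: alternative
-- what changed: B builds each denomination's finished column of string cells directly (spaces, count label, bars) and transposes the columns into rows, replacing A's build-an-int-matrix-then-mutate-each-column-in-place strategy with its stateful 'first' scan.
import Mathlib
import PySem

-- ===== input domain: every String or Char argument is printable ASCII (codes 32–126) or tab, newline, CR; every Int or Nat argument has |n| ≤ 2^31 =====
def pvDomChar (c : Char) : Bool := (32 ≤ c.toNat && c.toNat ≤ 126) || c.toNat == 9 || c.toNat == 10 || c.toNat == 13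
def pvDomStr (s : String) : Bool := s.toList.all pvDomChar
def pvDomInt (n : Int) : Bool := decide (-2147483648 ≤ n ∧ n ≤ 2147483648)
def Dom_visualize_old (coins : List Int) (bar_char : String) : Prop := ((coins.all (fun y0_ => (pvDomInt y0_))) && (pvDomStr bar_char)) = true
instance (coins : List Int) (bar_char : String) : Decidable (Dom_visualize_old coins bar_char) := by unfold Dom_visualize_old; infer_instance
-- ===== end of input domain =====

-- B replaces A's build-int-matrix-then-mutate-columns strategy by building each
-- denomination's finished column of string cells directly and transposing; same output.

-- Python mixes ints and strings inside matrix_graph, so A's port uses this cell type.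
inductive PvCell
  | int : Int → PvCell
  | str : List Char → PvCell
deriving DecidableEq, Repr

-- ' '.join(row): in A every cell is a string when joined (ints would be a TypeError,
-- unreachable since every column is transformed exactly once); the int branch is dead.
def pvCellStr : PvCell → List Char
  | PvCell.int n => PySem.Int.toChars n
  | PvCell.str s => s

-- matrix[r][i] = v  (indices are in range at every use in A, so List.set/getD are exact)
def pvSetCell (m : List (List PvCell)) (r i : Nat) (v : PvCell) : List (List PvCell) :=
  m.set r ((m.getD r []).set i v)

-- ===== PORT A =====
def visualize_old (coins : List Int) (bar_char : String) : String :=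
  let vc : PySem.Dict Int Int :=
    coins.foldl (fun d coin => d.modify coin 0 (· + 1)) PySem.Dict.empty
  let scd : List (Int × Int) :=
    PySem.List.enumerate (PySem.List.sorted vc.keys (fun x => x) false) 0
  match PySem.List.max? vc.values (fun x => x) with
  | none => ""   -- Python raises ValueError here (max of empty, coins = []); excluded by Pre_
  | some mx =>
    let matrix0 : List (List PvCell) :=
      (PySem.List.pyRange 0 (mx + 1) 1).foldl
        (fun m _ => m ++ [List.replicate vc.keys.length (PvCell.int 0)]) []
    let matrix1 : List (List PvCell) :=
      scd.foldl (fun m p =>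
        vc.items.foldl (fun m q =>
          if p.2 = q.1 then pvSetCell m (mx - q.2).natAbs p.1.toNat (PvCell.int q.2)
          else m) m) matrix0
    let width : Nat := vc.keys.length
    let matrix2 : List (List PvCell) :=
      (PySem.List.pyRange 0 (width : Int) 1).foldl (fun m iI =>
        let i := iI.toNat
        (m.foldl (fun (st : Int × List (List PvCell)) row =>
          match row.getD i (PvCell.str []) with
          | PvCell.int v =>
            if v = st.1 then (st.1, st.2 ++ [row.set i (PvCell.str [' ', ' '])])
            else if v > st.1 then
              (v, st.2 ++ [row.set i (PvCell.str (PySem.Int.toChars v ++ [' ']))])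
            else (st.1, st.2 ++ [row.set i (PvCell.str (bar_char.toList ++ bar_char.toList))])
          | PvCell.str _ => (st.1, st.2 ++ [row]))  -- unreachable: Python would raise TypeError
          ((0 : Int), [])).2) matrix1
    let fin : List Char × List Char :=
      matrix2.foldl (fun (acc : List Char × List Char) row =>
        let joined := PySem.Chars.join [' '] (row.map pvCellStr)
        (acc.1 ++ joined ++ ['\n'], List.replicate joined.length '-')) ([], [])
    let endL : List (List Char) := scd.map (fun p => PySem.Int.toChars p.2)
    let formatted : List (List Char) :=
      endL.foldl (fun acc l => if l.length < 2 then acc ++ [l ++ [' ']] else acc ++ [l]) []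
    String.ofList (fin.1 ++ fin.2 ++ ['\n'] ++ PySem.Chars.join [' '] formatted)

-- ===== PORT B =====
-- zip(*columns): rows until the shortest column runs out (all columns have equal length here).
def pvZipT {α : Type} (cols : List (List α)) : List (List α) :=
  if h : cols = [] ∨ cols.any (·.isEmpty) then []
  else cols.filterMap List.head? :: pvZipT (cols.map List.tail)
termination_by (cols.headD []).length
decreasing_by
  simp only [not_or, List.any_eq_true, not_exists] at h
  obtain ⟨h1, h2⟩ := h
  cases cols with
  | nil => exact absurd rfl h1
  | cons c cs =>
    have hc : ¬ c.isEmpty := by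
      intro hE; exact h2 c ⟨List.mem_cons_self, hE⟩
    cases c with
    | nil => simp at hc
    | cons a as => simp

def visualize_old_alt (coins : List Int) (bar_char : String) : String :=
  let counts : PySem.Dict Int Int := PySem.Dict.counter coins
  let denoms : List Int := PySem.List.sorted counts.keys (fun x => x) false
  match PySem.List.max? counts.values (fun x => x) with
  | none => ""   -- Python raises ValueError here (max of empty, coins = []); excluded by Pre_
  | some maxCount =>
    let columns : List (List (List Char)) :=
      denoms.map (fun den =>
        let s := counts.getD den 0   -- counts[den]; den is a key, so no KeyError
        List.replicate (maxCount - s).toNat [' ', ' ']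
          ++ [PySem.Int.toChars s ++ [' ']]
          ++ List.replicate s.toNat (bar_char.toList ++ bar_char.toList))
    let rows : List (List Char) := (pvZipT columns).map (fun cells => PySem.Chars.join [' '] cells)
    let body : List Char := rows.foldl (fun acc r => acc ++ r ++ ['\n']) []
    let dash : List Char := List.replicate ((rows.getLast?).getD []).length '-'
    let labels : List (List Char) :=
      denoms.map (fun d =>
        let l := PySem.Int.toChars d
        if l.length < 2 then l ++ [' '] else l)
    String.ofList (body ++ dash ++ ['\n'] ++ PySem.Chars.join [' '] labels)

-- ===== PRECONDITION & SPEC =====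
-- A raises ValueError (max() of an empty sequence) exactly when coins is empty.
def Pre_visualize_old (coins : List Int) (bar_char : String) : Prop := coins ≠ []
instance (coins : List Int) (bar_char : String) : Decidable (Pre_visualize_old coins bar_char) := by unfold Pre_visualize_old; infer_instance

def pvWitness_visualize_old : List Int × String := ([1, 1, 2, 5, 5, 5], "#")

def Spec_visualize_old (coins : List Int) (bar_char : String) (out : String) : Prop := out = visualize_old_alt coins bar_char
instance (coins : List Int) (bar_char : String) (out : String) : Decidable (Spec_visualize_old coins bar_char out) := by unfold Spec_visualize_old; infer_instance

-- ===== CLAIM (what is proved, stated in full; the proofs are below) =====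
def Claim_equal_visualize_old : Prop := ∀ (coins : List Int) (bar_char : String), Dom_visualize_old coins bar_char → Pre_visualize_old coins bar_char → Spec_visualize_old coins bar_char (visualize_old coins bar_char)

-- ===== LEMMAS AND PROOFS =====

def pvGet (m : List (List PvCell)) (r i : Nat) : PvCell :=
  (m.getD r []).getD i (PvCell.str [])

theorem pvSetCell_length (m : List (List PvCell)) (r i : Nat) (v : PvCell) :
    (pvSetCell m r i v).length = m.length := by
  simp [pvSetCell]

theorem getD_set_list {α : Type} (l : List α) (i j : Nat) (a d : α) :
    (l.set i a).getD j d = if j = i ∧ i < l.length then a else l.getD j d := by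
  simp only [List.getD_eq_getElem?_getD, List.getElem?_set]
  by_cases h1 : i = j
  · subst h1
    by_cases h2 : i < l.length
    · simp [h2]
    · simp [h2]
  · rw [if_neg h1, if_neg (by tauto)]

theorem pvSetCell_rowlen (m : List (List PvCell)) (r i : Nat) (v : PvCell) (r' : Nat) :
    ((pvSetCell m r i v).getD r' []).length = (m.getD r' []).length := by
  simp only [pvSetCell, getD_set_list]
  split_ifs with h
  · rw [h.1]; simp
  · rfl

theorem pvGet_pvSetCell (m : List (List PvCell)) (r i : Nat) (v : PvCell) (r' i' : Nat) :
    pvGet (pvSetCell m r i v) r' i' =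
      if r' = r ∧ i' = i ∧ r < m.length ∧ i < (m.getD r []).length then v
      else pvGet m r' i' := by
  simp only [pvGet, pvSetCell, getD_set_list]
  by_cases hr : r' = r ∧ r < m.length
  · rw [if_pos hr]
    rw [getD_set_list]
    by_cases hi : i' = i ∧ i < (m.getD r []).length
    · rw [if_pos hi, if_pos ⟨hr.1, hi.1, hr.2, hi.2⟩]
    · rw [if_neg hi, hr.1, if_neg (by tauto)]
  · rw [if_neg hr, if_neg (by tauto)]

-- fold of writes at distinct columns
def pvWrite (m : List (List PvCell)) (w : Nat × Nat × Int) : List (List PvCell) :=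
  pvSetCell m w.2.1 w.1 (PvCell.int w.2.2)

theorem pvWrites_length (L : List (Nat × Nat × Int)) (m : List (List PvCell)) :
    (L.foldl pvWrite m).length = m.length := by
  induction L generalizing m with
  | nil => rfl
  | cons w L ih => simp [List.foldl_cons, ih, pvWrite, pvSetCell_length]

theorem pvWrites_rowlen (L : List (Nat × Nat × Int)) (m : List (List PvCell)) (r : Nat) :
    ((L.foldl pvWrite m).getD r []).length = (m.getD r []).length := by
  induction L generalizing m with
  | nil => rfl
  | cons w L ih =>
    rw [List.foldl_cons, pvWrite, ih, pvSetCell_rowlen]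

theorem pvGet_pvWrites_of_not_mem (L : List (Nat × Nat × Int)) (m : List (List PvCell))
    (r i : Nat) (h : ∀ w ∈ L, w.1 ≠ i) :
    pvGet (L.foldl pvWrite m) r i = pvGet m r i := by
  induction L generalizing m with
  | nil => rfl
  | cons w L ih =>
    rw [List.foldl_cons, ih _ (fun w hw => h w (List.mem_cons_of_mem _ hw))]
    rw [pvWrite, pvGet_pvSetCell, if_neg]
    intro hc
    exact h w List.mem_cons_self hc.2.1.symm

theorem pvGet_pvWrites_of_mem (L : List (Nat × Nat × Int)) (m : List (List PvCell))
    (w : Nat × Nat × Int) (hw : w ∈ L) (hnd : (L.map (·.1)).Nodup)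
    (hb : w.2.1 < m.length ∧ w.1 < (m.getD w.2.1 []).length) (r : Nat) :
    pvGet (L.foldl pvWrite m) r w.1 =
      if r = w.2.1 then PvCell.int w.2.2 else pvGet m r w.1 := by
  induction L generalizing m with
  | nil => cases hw
  | cons w0 L ih =>
    rw [List.foldl_cons]
    rcases List.mem_cons.mp hw with heq | hmem
    · subst heq
      have hrest : ∀ w' ∈ L, w'.1 ≠ w.1 := by
        intro w' hw' hc
        have h1 := (List.nodup_cons.mp hnd).1
        apply h1
        have : w'.1 ∈ List.map (·.1) L := List.mem_map_of_mem hw'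
        simpa [hc] using this
      rw [pvGet_pvWrites_of_not_mem _ _ _ _ hrest]
      rw [pvWrite, pvGet_pvSetCell]
      by_cases hr : r = w.2.1
      · rw [if_pos ⟨hr, rfl, hb.1, hb.2⟩, if_pos hr]
      · rw [if_neg (by tauto), if_neg hr]
    · have hne : w0.1 ≠ w.1 := by
        intro hc
        apply (List.nodup_cons.mp hnd).1
        have : w.1 ∈ List.map (·.1) L := List.mem_map_of_mem hmem
        simpa [← hc] using this
      have hb' : w.2.1 < (pvWrite m w0).length ∧
          w.1 < ((pvWrite m w0).getD w.2.1 []).length := by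
        rw [pvWrite, pvSetCell_length, pvSetCell_rowlen]; exact hb
      rw [ih _ hmem (List.nodup_cons.mp hnd).2 hb']
      have hget : pvGet (pvWrite m w0) r w.1 = pvGet m r w.1 := by
        rw [pvWrite, pvGet_pvSetCell, if_neg (by intro hc; exact hne hc.2.1.symm)]
      rw [hget]

-- one column transform (A's inner row loop over the matrix, state = `first`)
def pvColT (bar : List Char) (i : Nat) : Int → List (List PvCell) → List (List PvCell)
  | _, [] => []
  | first, row :: rest =>
    match row.getD i (PvCell.str []) with
    | PvCell.int v =>
      if v = first then row.set i (PvCell.str [' ', ' ']) :: pvColT bar i first rest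
      else if v > first then
        row.set i (PvCell.str (PySem.Int.toChars v ++ [' '])) :: pvColT bar i v rest
      else row.set i (PvCell.str (bar ++ bar)) :: pvColT bar i first rest
    | PvCell.str _ => row :: pvColT bar i first rest

theorem pvColT_foldl (bar : List Char) (i : Nat) (rows : List (List PvCell))
    (f : Int) (acc : List (List PvCell)) :
    (rows.foldl (fun (st : Int × List (List PvCell)) row =>
        match row.getD i (PvCell.str []) with
        | PvCell.int v =>
          if v = st.1 then (st.1, st.2 ++ [row.set i (PvCell.str [' ', ' '])])
          else if v > st.1 then
            (v, st.2 ++ [row.set i (PvCell.str (PySem.Int.toChars v ++ [' ']))])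
          else (st.1, st.2 ++ [row.set i (PvCell.str (bar ++ bar))])
        | PvCell.str _ => (st.1, st.2 ++ [row])) (f, acc)).2
      = acc ++ pvColT bar i f rows := by
  induction rows generalizing f acc with
  | nil => simp [pvColT]
  | cons row rest ih =>
    rw [List.foldl_cons, pvColT]
    cases hc : row.getD i (PvCell.str []) with
    | int v =>
      by_cases h1 : v = f
      · simp only [hc, if_pos h1, ih]; simp [h1]
      · by_cases h2 : v > f
        · simp only [hc, if_neg h1, if_pos h2, ih]; simp
        · simp only [hc, if_neg h1, if_neg h2, ih]; simp
    | str s => simp only [hc, ih]; simp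

theorem pvColT_bars (bar : List Char) (i : Nat) (s : Int) (rows : List (List PvCell))
    (hs : 0 < s) (h : ∀ row ∈ rows, row.getD i (PvCell.str []) = PvCell.int 0) :
    pvColT bar i s rows = rows.map (fun row => row.set i (PvCell.str (bar ++ bar))) := by
  induction rows with
  | nil => simp [pvColT]
  | cons row rest ih =>
    rw [pvColT, h row List.mem_cons_self]
    dsimp only
    rw [if_neg (by omega : ¬ (0:Int) = s), if_neg (by omega : ¬ (0:Int) > s)]
    rw [ih (fun r hr => h r (List.mem_cons_of_mem _ hr))]
    rfl

theorem pvColT_spec (bar : List Char) (i : Nat) (s : Int) (r0 : Nat)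
    (rows : List (List PvCell)) (b : Nat) (hs : 0 < s)
    (hb : b ≤ r0) (hr0 : r0 < b + rows.length)
    (h : ∀ r, r < rows.length →
      (rows.getD r []).getD i (PvCell.str []) = PvCell.int (if b + r = r0 then s else 0)) :
    pvColT bar i 0 rows = (rows.zipIdx b).map (fun p =>
      p.1.set i (PvCell.str
        (if p.2 < r0 then [' ', ' ']
         else if p.2 = r0 then PySem.Int.toChars s ++ [' ']
         else bar ++ bar))) := by
  induction rows generalizing b with
  | nil => simp at hr0; omega
  | cons row rest ih =>
    have h0 := h 0 (by simp)
    simp only [List.getD_cons_zero] at h0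
    rw [List.zipIdx_cons, List.map_cons, pvColT, h0]
    dsimp only
    by_cases hbr : b = r0
    · rw [if_pos (by omega : b + 0 = r0)]
      rw [if_neg (by omega : ¬ s = 0), if_pos (by omega : s > 0)]
      rw [if_neg (by omega : ¬ b < r0), if_pos hbr]
      congr 1
      rw [pvColT_bars bar i s rest hs (by
        intro rr hrr
        obtain ⟨r, hr, hrr'⟩ := List.getElem_of_mem hrr
        have := h (r + 1) (by simpa using hr)
        rw [List.getD_cons_succ, List.getD_eq_getElem _ _ hr, hrr'] at this
        rw [this, if_neg (by omega : ¬ b + (r + 1) = r0)])]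
      have hmapeq : (rest.zipIdx (b + 1)).map (fun p =>
          p.1.set i (PvCell.str
            (if p.2 < r0 then [' ', ' ']
             else if p.2 = r0 then PySem.Int.toChars s ++ [' '] else bar ++ bar)))
          = (rest.zipIdx (b + 1)).map (fun p => p.1.set i (PvCell.str (bar ++ bar))) :=
        List.map_congr_left (fun p hp => by
          have h1 := List.le_snd_of_mem_zipIdx hp
          rw [if_neg (by omega), if_neg (by omega)])
      rw [hmapeq, show (rest.zipIdx (b + 1)).map (fun p => p.1.set i (PvCell.str (bar ++ bar)))
          = ((rest.zipIdx (b + 1)).map Prod.fst).map (fun q => q.set i (PvCell.str (bar ++ bar)))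
          from by rw [List.map_map]; rfl, List.zipIdx_map_fst]
    · rw [if_neg (by omega : ¬ b + 0 = r0)]
      rw [if_pos (by omega : (0:Int) = 0), if_pos (by omega : b < r0)]
      congr 1
      rw [ih (b + 1) (by omega) (by simp only [List.length_cons] at hr0; omega) (by
        intro r hr
        have := h (r + 1) (by simpa using hr)
        rw [List.getD_cons_succ] at this
        rw [this]
        congr 1
        by_cases hc : b + 1 + r = r0 <;> [rw [if_pos hc, if_pos (by omega)]; rw [if_neg hc, if_neg (by omega)]])]

theorem rowlen_zipIdxSet (m : List (List PvCell)) (i : Nat) (c : Nat → List Char) (r : Nat) :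
    (((m.zipIdx).map (fun p => p.1.set i (PvCell.str (c p.2)))).getD r []).length
      = (m.getD r []).length := by
  by_cases hr : r < m.length
  · rw [List.getD_eq_getElem _ _ (by simpa using hr), List.getD_eq_getElem _ _ hr]
    simp [List.getElem_zipIdx]
  · rw [List.getD_eq_default _ _ (by simpa using (by omega : m.length ≤ r)),
      List.getD_eq_default _ _ (by omega)]

theorem pvGet_zipIdxSet (m : List (List PvCell)) (i : Nat) (c : Nat → List Char) (r i' : Nat) :
    pvGet ((m.zipIdx).map (fun p => p.1.set i (PvCell.str (c p.2)))) r i' =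
      if r < m.length ∧ i' = i ∧ i < (m.getD r []).length then PvCell.str (c r)
      else pvGet m r i' := by
  by_cases hr : r < m.length
  · have hM : ((m.zipIdx).map (fun p => p.1.set i (PvCell.str (c p.2)))).getD r []
        = (m[r]).set i (PvCell.str (c r)) := by
      rw [List.getD_eq_getElem _ _ (by simpa using hr)]
      simp [List.getElem_zipIdx]
    unfold pvGet
    rw [hM, getD_set_list, List.getD_eq_getElem m _ hr]
    by_cases hi : i' = i ∧ i < m[r].length
    · rw [if_pos hi, if_pos ⟨hr, hi⟩]
    · rw [if_neg hi, if_neg (by tauto)]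
  · rw [if_neg (by tauto)]
    unfold pvGet
    have h1 : ((m.zipIdx).map (fun p => p.1.set i (PvCell.str (c p.2)))).getD r [] = [] :=
      List.getD_eq_default _ _ (by simpa using (by omega : m.length ≤ r))
    have h2 : m.getD r [] = ([] : List PvCell) := List.getD_eq_default _ _ (by omega)
    rw [h1, h2]

-- cell that column i carries in row r after the transform
def pvCellC (bar : List Char) (rowOf : Nat → Nat) (sv : Nat → Int) (i r : Nat) : List Char :=
  if r < rowOf i then [' ', ' ']
  else if r = rowOf i then PySem.Int.toChars (sv i) ++ [' ']
  else bar ++ bar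

def pvInv (bar : List Char) (R n : Nat) (rowOf : Nat → Nat) (sv : Nat → Int)
    (k : Nat) (m : List (List PvCell)) : Prop :=
  m.length = R ∧ (∀ r < R, (m.getD r []).length = n) ∧
  ∀ r < R, ∀ i < n, pvGet m r i =
    if i < k then PvCell.str (pvCellC bar rowOf sv i r)
    else PvCell.int (if r = rowOf i then sv i else 0)

theorem pvInv_step (bar : List Char) (R n : Nat) (rowOf : Nat → Nat) (sv : Nat → Int)
    (hrow : ∀ i < n, rowOf i < R) (hsv : ∀ i < n, 0 < sv i)
    (k : Nat) (m : List (List PvCell)) (hk : k < n) (hInv : pvInv bar R n rowOf sv k m) :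
    pvInv bar R n rowOf sv (k + 1) (pvColT bar k 0 m) := by
  obtain ⟨hlen, hrlen, hent⟩ := hInv
  have hspec' : pvColT bar k 0 m = (m.zipIdx).map (fun p =>
      p.1.set k (PvCell.str (pvCellC bar rowOf sv k p.2))) := by
    have hspec := pvColT_spec bar k (sv k) (rowOf k) m 0 (hsv k hk) (by omega)
      (by have := hrow k hk; rw [hlen]; omega)
      (by
        intro r hr
        rw [hlen] at hr
        have := hent r hr k hk
        rw [if_neg (by omega : ¬ k < k)] at this
        unfold pvGet at this
        rw [this]
        congr 1
        simp)
    rw [hspec]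
    rfl
  rw [hspec']
  refine ⟨by simpa using hlen, ?_, ?_⟩
  · intro r hr
    rw [rowlen_zipIdxSet]
    exact hrlen r hr
  · intro r hr i hi
    rw [pvGet_zipIdxSet]
    by_cases hik : i = k
    · subst hik
      rw [if_pos ⟨by rw [hlen]; omega, rfl, by rw [hrlen r hr]; omega⟩, if_pos (by omega)]
    · rw [if_neg (by tauto), hent r hr i hi]
      by_cases hlt : i < k
      · rw [if_pos hlt, if_pos (by omega)]
      · rw [if_neg hlt, if_neg (show ¬ i < k + 1 by omega)]

theorem pvInv_fold (bar : List Char) (R n : Nat) (rowOf : Nat → Nat) (sv : Nat → Int)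
    (hrow : ∀ i < n, rowOf i < R) (hsv : ∀ i < n, 0 < sv i)
    (m0 : List (List PvCell)) (h0 : pvInv bar R n rowOf sv 0 m0) :
    ∀ k ≤ n, pvInv bar R n rowOf sv k
      ((List.range k).foldl (fun m j => pvColT bar j 0 m) m0) := by
  intro k
  induction k with
  | zero => intro _; simpa using h0
  | succ k ih =>
    intro hk
    rw [List.range_succ, List.foldl_append, List.foldl_cons, List.foldl_nil]
    exact pvInv_step bar R n rowOf sv hrow hsv k _ (by omega) (ih (by omega))

theorem foldl_const_snd {α β : Type} (f : α → β) (b : β) (l : List α) :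
    l.foldl (fun _ x => f x) b = ((l.getLast?).map f).getD b := by
  induction l generalizing b with
  | nil => rfl
  | cons x xs ih =>
    rw [List.foldl_cons, ih]
    cases hxs : xs.getLast? with
    | none => rw [List.getLast?_eq_none_iff.mp hxs]; rfl
    | some y => rw [List.getLast?_cons, hxs]; rfl

-- the cell of the finished chart in column of count s, row r (R = max+1 rows)
def pvEntry (bar : List Char) (mx s : Int) (r : Nat) : List Char :=
  if r < (mx - s).toNat then [' ', ' ']
  else if r = (mx - s).toNat then PySem.Int.toChars s ++ [' ']
  else bar ++ bar

-- B's directly-built column, entrywise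
theorem colB_getD (bar : List Char) (mx s : Int) (hs : 0 < s) (hmx : s ≤ mx) (r : Nat) :
    (List.replicate (mx - s).toNat [' ', ' ']
      ++ [PySem.Int.toChars s ++ [' ']]
      ++ List.replicate s.toNat (bar ++ bar)).getD r []
    = if r < (mx + 1).toNat then pvEntry bar mx s r else [] := by
  rw [List.append_assoc]
  by_cases h1 : r < (mx - s).toNat
  · rw [List.getD_append _ _ _ _ (by simp only [List.length_replicate]; omega),
      List.getD_replicate _ h1, if_pos (by omega), pvEntry, if_pos h1]
  · rw [List.getD_append_right _ _ _ _ (by simp only [List.length_replicate]; omega)]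
    simp only [List.length_replicate]
    by_cases h2 : r = (mx - s).toNat
    · rw [show r - (mx - s).toNat = 0 by omega, List.singleton_append, List.getD_cons_zero,
        if_pos (by omega), pvEntry, if_neg (by omega), if_pos h2]
    · obtain ⟨t, ht⟩ : ∃ t, r - (mx - s).toNat = t + 1 := ⟨r - (mx - s).toNat - 1, by omega⟩
      rw [ht, List.singleton_append, List.getD_cons_succ]
      by_cases h4 : t < s.toNat
      · rw [List.getD_replicate _ h4, if_pos (by omega), pvEntry, if_neg h1, if_neg h2]
      · rw [List.getD_eq_default _ _ (by simp only [List.length_replicate]; omega),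
          if_neg (by omega)]

theorem colB_length (bar : List Char) (mx s : Int) (hs : 0 < s) (hmx : s ≤ mx) :
    (List.replicate (mx - s).toNat [' ', ' ']
      ++ [PySem.Int.toChars s ++ [' ']]
      ++ List.replicate s.toNat (bar ++ bar)).length = (mx + 1).toNat := by
  simp only [List.length_append, List.length_replicate, List.length_cons, List.length_nil]
  omega

theorem filterMap_head?_eq {α : Type} (d : α) (cols : List (List α))
    (h : ∀ c ∈ cols, c ≠ []) :
    cols.filterMap List.head? = cols.map (fun c => c.getD 0 d) := by
  induction cols with
  | nil => rfl
  | cons c cs ih =>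
    cases hc : c with
    | nil => exact absurd rfl (hc ▸ h c List.mem_cons_self)
    | cons a t =>
      rw [List.filterMap_cons, List.map_cons]
      simp only [List.head?_cons, List.getD_cons_zero]
      rw [ih (fun c' hc' => h c' (List.mem_cons_of_mem _ hc'))]

theorem pvZipT_eq (R : Nat) : ∀ (cols : List (List (List Char))), cols ≠ [] →
    (∀ c ∈ cols, c.length = R) →
    pvZipT cols = (List.range R).map (fun r => cols.map (fun c => c.getD r [])) := by
  induction R with
  | zero =>
    intro cols hne hlen
    rw [pvZipT, dif_pos]
    · simp
    · right
      cases cols with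
      | nil => exact absurd rfl hne
      | cons c cs =>
        simp only [List.any_cons, Bool.or_eq_true]
        left
        rw [List.isEmpty_iff, List.eq_nil_iff_length_eq_zero]
        exact hlen c List.mem_cons_self
  | succ R ih =>
    intro cols hne hlen
    have hnonempty : ∀ c ∈ cols, c ≠ [] := by
      intro c hc hcn
      have := hlen c hc
      rw [hcn] at this
      simp at this
    rw [pvZipT, dif_neg (by
      rintro (h | h)
      · exact hne h
      · rw [List.any_eq_true] at h
        obtain ⟨c, hc, hcE⟩ := h
        exact hnonempty c hc (List.isEmpty_iff.mp hcE))]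
    rw [filterMap_head?_eq []  cols hnonempty]
    rw [ih (cols.map List.tail) (by simpa using hne) (by
      intro c hc
      obtain ⟨c0, hc0, rfl⟩ := List.mem_map.mp hc
      have := hlen c0 hc0
      rw [List.length_tail, this]
      rfl)]
    rw [List.range_succ_eq_map, List.map_cons, List.map_map]
    congr 1
    apply List.map_congr_left
    intro r _
    rw [Function.comp_apply, List.map_map]
    apply List.map_congr_left
    intro c hc
    rw [Function.comp_apply]
    cases hcc : c with
    | nil => exact absurd rfl (hcc ▸ hnonempty c hc)
    | cons a t => rw [List.tail_cons, List.getD_cons_succ]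


def pvCanon (coins : List Int) (bar : List Char) (mx : Int) : String :=
  let ks := PySem.List.sorted (PySem.Set.ofList coins) (fun x => x) false
  let R := (mx + 1).toNat
  let rowsC := (List.range R).map (fun r =>
    PySem.Chars.join [' '] (ks.map (fun den => pvEntry bar mx ((coins.count den : Nat) : Int) r)))
  let body := rowsC.foldl (fun acc r => acc ++ r ++ ['\n']) []
  let dash := List.replicate ((rowsC.getLast?).getD []).length '-'
  let labels := ks.map (fun d =>
    if (PySem.Int.toChars d).length < 2 then PySem.Int.toChars d ++ [' ']
    else PySem.Int.toChars d)
  String.ofList (body ++ dash ++ ['\n'] ++ PySem.Chars.join [' '] labels)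

theorem pv_facts (coins : List Int) (h : coins ≠ []) (mx : Int)
    (hmx : PySem.List.max? (PySem.Dict.counter coins).values (fun x => x) = some mx) :
    (∀ k ∈ PySem.Set.ofList coins, (1 : Int) ≤ ((coins.count k : Nat) : Int)) ∧
    (∀ k ∈ PySem.Set.ofList coins, ((coins.count k : Nat) : Int) ≤ mx) ∧
    1 ≤ mx := by
  have hvals : (PySem.Dict.counter coins).values
      = (PySem.Set.ofList coins).map (fun k => ((coins.count k : Nat) : Int)) := by
    have := PySem.Dict.values_eq_map_keys (PySem.Dict.counter coins)
      (PySem.Dict.nodup_keys_counter coins) (0 : Int)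
    rw [this, PySem.Dict.keys_counter]
    exact List.map_congr_left (fun k _ => PySem.Dict.getD_counter coins k)
  have h1 : ∀ k ∈ PySem.Set.ofList coins, (1 : Int) ≤ ((coins.count k : Nat) : Int) := by
    intro k hk
    have : k ∈ coins := (PySem.Set.mem_ofList _ _).mp hk
    have := List.count_pos_iff.mpr this
    exact_mod_cast this
  have h2 : ∀ k ∈ PySem.Set.ofList coins, ((coins.count k : Nat) : Int) ≤ mx := by
    intro k hk
    exact PySem.List.max?_isMax hmx _ (hvals ▸ List.mem_map_of_mem hk)
  refine ⟨h1, h2, ?_⟩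
  have hmem := PySem.List.max?_mem hmx
  rw [hvals] at hmem
  obtain ⟨k, hk, hkk⟩ := List.mem_map.mp hmem
  calc (1:Int) ≤ _ := h1 k hk
    _ = mx := hkk

theorem foldl_if_fst_none {δ : Type} (l : List (Int × Int)) (a : Int)
    (h : ∀ x ∈ l, a ≠ x.1) (f : δ → Int × Int → δ) (init : δ) :
    l.foldl (fun acc x => if a = x.1 then f acc x else acc) init = init := by
  induction l generalizing init with
  | nil => rfl
  | cons x xs ih =>
    rw [List.foldl_cons, if_neg (h x List.mem_cons_self)]
    exact ih (fun y hy => h y (List.mem_cons_of_mem _ hy)) init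

theorem foldl_if_fst_singleton {δ : Type} (S : List Int) (g : Int → Int) (a : Int)
    (hnd : S.Nodup) (ha : a ∈ S) (f : δ → Int × Int → δ) (init : δ) :
    (S.map (fun k => (k, g k))).foldl (fun acc x => if a = x.1 then f acc x else acc) init
      = f init (a, g a) := by
  induction S generalizing init with
  | nil => cases ha
  | cons s ss ih =>
    rw [List.map_cons, List.foldl_cons]
    rcases List.mem_cons.mp ha with rfl | hmem
    · rw [if_pos rfl]
      exact foldl_if_fst_none _ _ (by
        intro x hx
        obtain ⟨k, hk, rfl⟩ := List.mem_map.mp hx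
        intro hc
        exact (List.nodup_cons.mp hnd).1 (by rw [show a = k from hc]; exact hk)) f _
    · rw [if_neg (by
        intro hc
        exact (List.nodup_cons.mp hnd).1 (by rw [← show a = s from hc]; exact hmem))]
      exact ih (List.nodup_cons.mp hnd).2 hmem init

theorem pv_A_canon (coins : List Int) (bar_char : String) (h : coins ≠ []) (mx : Int)
    (hmx : PySem.List.max? (PySem.Dict.counter coins).values (fun x => x) = some mx) :
    visualize_old coins bar_char = pvCanon coins bar_char.toList mx := by
  obtain ⟨hc1, hcmx, hmx1⟩ := pv_facts coins h mx hmx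
  have hSne : PySem.Set.ofList coins ≠ [] := by
    cases coins with
    | nil => exact absurd rfl h
    | cons c cs =>
      intro hcn
      have : c ∈ PySem.Set.ofList (c :: cs) := (PySem.Set.mem_ofList _ _).mpr List.mem_cons_self
      rw [hcn] at this
      cases this
  have hnd : (PySem.Set.ofList coins).Nodup := PySem.Set.nodup_ofList coins
  have hksmem : ∀ k ∈ PySem.List.sorted (PySem.Set.ofList coins) (fun x => x) false,
      k ∈ PySem.Set.ofList coins :=
    fun k hk => (PySem.List.sorted_perm _ _ _).mem_iff.mp hk
  have hksne : PySem.List.sorted (PySem.Set.ofList coins) (fun x => x) false ≠ [] :=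
    fun hcn => hSne ((PySem.List.sorted_eq_nil_iff _ _ _).mp hcn)
  unfold visualize_old pvCanon
  dsimp only
  rw [show (coins.foldl (fun d coin => d.modify coin 0 (· + 1)) PySem.Dict.empty)
      = PySem.Dict.counter coins from (PySem.Dict.counter_eq_foldl coins).symm]
  rw [hmx]
  dsimp only
  simp only [PySem.Dict.keys_counter, PySem.Dict.items_counter]
  set S := PySem.Set.ofList coins with hS
  set ks := PySem.List.sorted S (fun x => x) false with hksdef
  set bar := bar_char.toList with hbar
  set n := S.length with hn
  set R := (mx + 1).toNat with hR
  set cnt : Int → Int := fun k => ((coins.count k : Nat) : Int) with hcnt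
  set sv : Nat → Int := fun i => cnt (ks.getD i 0) with hsv
  set rowOf : Nat → Nat := fun i => (mx - sv i).toNat with hrowOf
  have hklen : ks.length = n := (PySem.List.sorted_perm _ _ _).length_eq
  -- matrix0
  rw [show (mx + 1 : Int) = ((R : Nat) : Int) by omega, PySem.List.pyRange_zero_natCast]
  rw [PySem.List.foldl_append_singleton_eq_map
    (f := fun _ => List.replicate n (PvCell.int 0))]
  rw [List.nil_append, List.map_map,
    show ((fun (_ : Int) => List.replicate n (PvCell.int 0)) ∘ (fun (k : Nat) => (k : Int)))
      = (fun (_ : Nat) => List.replicate n (PvCell.int 0)) from rfl,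
    List.map_const', List.length_range]
  -- matrix1 : placement loop = fold of writes
  set m0 : List (List PvCell) := List.replicate R (List.replicate n (PvCell.int 0)) with hm0
  set L : List (Nat × Nat × Int) :=
    ks.zipIdx.map (fun q => (q.2, (mx - cnt q.1).toNat, cnt q.1)) with hL
  have hplace :
      (PySem.List.enumerate ks 0).foldl (fun m p =>
        (S.map (fun k => (k, ((coins.count k : Nat) : Int)))).foldl (fun m q =>
          if p.2 = q.1 then pvSetCell m (mx - q.2).natAbs p.1.toNat (PvCell.int q.2)
          else m) m) m0
      = L.foldl pvWrite m0 := by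
    rw [PySem.List.enumerate_eq_zipIdx_map, List.foldl_map, hL, List.foldl_map]
    apply PySem.List.foldl_congr_mem
    intro m q hq
    have hq1 : q.1 ∈ ks := by
      have : q.1 ∈ ks.zipIdx.map Prod.fst := List.mem_map_of_mem hq
      rwa [List.zipIdx_map_fst] at this
    have hq1S : q.1 ∈ S := hksmem q.1 hq1
    dsimp only
    rw [foldl_if_fst_singleton S (fun k => ((coins.count k : Nat) : Int)) q.1 hnd hq1S]
    rw [pvWrite]
    have h1 : (mx - cnt q.1).natAbs = (mx - cnt q.1).toNat := by
      have hle : cnt q.1 ≤ mx := hcmx q.1 hq1S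
      omega
    have h2 : ((0 : Int) + (q.2 : Int)).toNat = q.2 := by omega
    rw [h1, h2]
  rw [hplace]
  -- matrix2 : the column-transform loop
  have hcolstep :
      (((List.range n).map (fun (k : Nat) => (k : Int))).foldl (fun m iI =>
        (m.foldl (fun (st : Int × List (List PvCell)) row =>
          match row.getD iI.toNat (PvCell.str []) with
          | PvCell.int v =>
            if v = st.1 then (st.1, st.2 ++ [row.set iI.toNat (PvCell.str [' ', ' '])])
            else if v > st.1 then
              (v, st.2 ++ [row.set iI.toNat (PvCell.str (PySem.Int.toChars v ++ [' ']))])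
            else (st.1, st.2 ++ [row.set iI.toNat (PvCell.str (bar ++ bar))])
          | PvCell.str _ => (st.1, st.2 ++ [row])) ((0 : Int), [])).2)
        (L.foldl pvWrite m0))
      = (List.range n).foldl (fun m j => pvColT bar j 0 m) (L.foldl pvWrite m0) := by
    rw [List.foldl_map]
    apply PySem.List.foldl_congr_mem
    intro m j _
    rw [show ((j : Int)).toNat = j from by omega]
    exact pvColT_foldl bar j m 0 []
  have hbounds : ∀ i < n, rowOf i < R ∧ 0 < sv i ∧ sv i ≤ mx := by
    intro i hi
    have hilen : i < ks.length := by omega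
    have hksi : ks.getD i 0 ∈ S := by
      rw [List.getD_eq_getElem _ _ hilen]
      exact hksmem _ (List.getElem_mem _)
    have h1 : (1 : Int) ≤ cnt (ks.getD i 0) := hc1 _ hksi
    have h2 : cnt (ks.getD i 0) ≤ mx := hcmx _ hksi
    have h3 : sv i = cnt (ks.getD i 0) := rfl
    have h4 : rowOf i = (mx - sv i).toNat := rfl
    refine ⟨by omega, by omega, by omega⟩
  have h0 : pvInv bar R n rowOf sv 0 (L.foldl pvWrite m0) := by
    refine ⟨?_, ?_, ?_⟩
    · rw [pvWrites_length, hm0, List.length_replicate]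
    · intro r hr
      rw [pvWrites_rowlen, hm0, List.getD_replicate _ hr, List.length_replicate]
    · intro r hr i hi
      rw [if_neg (by omega : ¬ i < 0)]
      have hLlen : L.length = n := by rw [hL]; simp [hklen]
      have hiL : i < L.length := by omega
      have hiks : i < ks.length := by omega
      have hz : (ks[i], i) ∈ ks.zipIdx := by
        rw [List.mem_zipIdx_iff_getElem?]
        simp [hiks]
      have hLi : (i, rowOf i, sv i) ∈ L := by
        rw [hL]
        refine List.mem_map.mpr ⟨(ks[i], i), hz, ?_⟩
        have hsveq : sv i = cnt ks[i] := by
          show cnt (ks.getD i 0) = cnt ks[i]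
          rw [List.getD_eq_getElem _ _ hiks]
        have hroweq : rowOf i = (mx - cnt ks[i]).toNat := by
          show (mx - sv i).toNat = (mx - cnt ks[i]).toNat
          rw [hsveq]
        rw [hsveq, hroweq]
      have hndL : (L.map (·.1)).Nodup := by
        rw [hL, List.map_map,
          show ((fun (w : Nat × Nat × Int) => w.1)
              ∘ (fun (q : Int × Nat) => (q.2, (mx - cnt q.1).toNat, cnt q.1)))
            = Prod.snd from rfl,
          List.zipIdx_map_snd]
        exact List.nodup_range'
      have hbnds : rowOf i < m0.length ∧ i < (m0.getD (rowOf i) []).length := by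
        rw [hm0, List.length_replicate, List.getD_replicate _ (hbounds i hi).1,
          List.length_replicate]
        exact ⟨(hbounds i hi).1, hi⟩
      rw [pvGet_pvWrites_of_mem L m0 (i, rowOf i, sv i) hLi hndL hbnds r]
      by_cases hcase : r = rowOf i
      · rw [if_pos hcase, if_pos hcase]
      · rw [if_neg hcase, if_neg hcase, pvGet, hm0, List.getD_replicate _ hr,
          List.getD_replicate _ hi]
  have hInvN := pvInv_fold bar R n rowOf sv (fun i hi => (hbounds i hi).1)
    (fun i hi => (hbounds i hi).2.1) _ h0 n le_rfl
  have hM2 : (List.range n).foldl (fun m j => pvColT bar j 0 m) (L.foldl pvWrite m0)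
      = (List.range R).map (fun r => ks.map (fun den => PvCell.str (pvEntry bar mx (cnt den) r))) := by
    obtain ⟨hlen2, hrlen2, hent2⟩ := hInvN
    apply List.ext_getElem (by rw [hlen2]; simp)
    intro r h1 h2
    have hrR : r < R := by rw [hlen2] at h1; exact h1
    have hrowlen := hrlen2 r hrR
    rw [List.getD_eq_getElem _ _ h1] at hrowlen
    apply List.ext_getElem (by rw [hrowlen]; simp [hklen])
    intro i hi1 hi2
    have hin : i < n := by rw [hrowlen] at hi1; exact hi1
    have hent := hent2 r hrR i hin
    rw [if_pos hin] at hent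
    rw [pvGet, List.getD_eq_getElem _ _ h1, List.getD_eq_getElem _ _ hi1] at hent
    rw [hent]
    simp only [List.getElem_map, List.getElem_range]
    have hsveq : sv i = cnt ks[i] := by
      show cnt (ks.getD i 0) = cnt ks[i]
      rw [List.getD_eq_getElem _ _ (by omega : i < ks.length)]
    show PvCell.str (pvEntry bar mx (sv i) r) = _
    rw [hsveq]
  rw [PySem.List.pyRange_zero_natCast, hcolstep, hM2]
  rw [PySem.List.foldl_prod_mk
    (f := fun (acc : List Char) row =>
      acc ++ PySem.Chars.join [' '] (List.map pvCellStr row) ++ ['\n'])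
    (g := fun (_ : List Char) row =>
      List.replicate (PySem.Chars.join [' '] (List.map pvCellStr row)).length '-')]
  dsimp only
  have hbody : List.foldl (fun (acc : List Char) row =>
        acc ++ PySem.Chars.join [' '] (List.map pvCellStr row) ++ ['\n']) []
      (List.map (fun r => List.map (fun den => PvCell.str (pvEntry bar mx (cnt den) r)) ks)
        (List.range R))
      = List.foldl (fun acc r => acc ++ r ++ ['\n']) []
        (List.map (fun r => PySem.Chars.join [' ']
          (List.map (fun den => pvEntry bar mx (cnt den) r) ks)) (List.range R)) := by
    rw [List.foldl_map, List.foldl_map]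
    apply PySem.List.foldl_congr_mem
    intro acc r _
    rw [List.map_map]
    rfl
  have hlast : ∃ rl, (List.range R).getLast? = some rl := by
    cases hcase : (List.range R).getLast? with
    | some rl => exact ⟨rl, rfl⟩
    | none =>
      rw [List.getLast?_eq_none_iff, List.range_eq_nil] at hcase
      omega
  obtain ⟨rl, hrl⟩ := hlast
  have hdash : List.foldl (fun (_ : List Char) row =>
        List.replicate (PySem.Chars.join [' '] (List.map pvCellStr row)).length '-') []
      (List.map (fun r => List.map (fun den => PvCell.str (pvEntry bar mx (cnt den) r)) ks)
        (List.range R))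
      = List.replicate
          (((List.map (fun r => PySem.Chars.join [' ']
              (List.map (fun den => pvEntry bar mx (cnt den) r) ks))
            (List.range R)).getLast?).getD []).length '-' := by
    rw [foldl_const_snd, List.getLast?_map, List.getLast?_map, hrl]
    simp only [Option.map_some, Option.getD_some]
    rw [List.map_map]
    rfl
  have hlbl : List.foldl (fun acc l =>
        if l.length < 2 then acc ++ [l ++ [' ']] else acc ++ [l]) []
      (List.map (fun p => PySem.Int.toChars p.2) (PySem.List.enumerate ks))
      = ks.map (fun d =>
          if (PySem.Int.toChars d).length < 2 then PySem.Int.toChars d ++ [' ']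
          else PySem.Int.toChars d) := by
    rw [show (fun (acc : List (List Char)) (l : List Char) =>
          if l.length < 2 then acc ++ [l ++ [' ']] else acc ++ [l])
        = (fun acc l => acc ++ [if l.length < 2 then l ++ [' '] else l]) from by
      funext acc l
      split_ifs <;> rfl]
    rw [PySem.List.foldl_append_singleton_eq_map, List.nil_append]
    rw [PySem.List.enumerate_eq_zipIdx_map, List.map_map, List.map_map]
    rw [show (((fun (l : List Char) =>
            if l.length < 2 then l ++ [' '] else l)
          ∘ (fun (p : Int × Int) => PySem.Int.toChars p.2))
          ∘ (fun (p : Int × Nat) => ((0 : Int) + (p.2 : Int), p.1)))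
        = ((fun d => if (PySem.Int.toChars d).length < 2 then PySem.Int.toChars d ++ [' ']
            else PySem.Int.toChars d) ∘ Prod.fst) from rfl]
    rw [← List.map_map, List.zipIdx_map_fst]
  rw [hbody, hdash, hlbl]

theorem pv_B_canon (coins : List Int) (bar_char : String) (h : coins ≠ []) (mx : Int)
    (hmx : PySem.List.max? (PySem.Dict.counter coins).values (fun x => x) = some mx) :
    visualize_old_alt coins bar_char = pvCanon coins bar_char.toList mx := by
  obtain ⟨hc1, hcmx, hmx1⟩ := pv_facts coins h mx hmx
  have hSne : PySem.Set.ofList coins ≠ [] := by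
    cases coins with
    | nil => exact absurd rfl h
    | cons c cs =>
      intro hcn
      have : c ∈ PySem.Set.ofList (c :: cs) := (PySem.Set.mem_ofList _ _).mpr List.mem_cons_self
      rw [hcn] at this
      cases this
  have hksmem : ∀ k ∈ PySem.List.sorted (PySem.Set.ofList coins) (fun x => x) false,
      k ∈ PySem.Set.ofList coins :=
    fun k hk => (PySem.List.sorted_perm _ _ _).mem_iff.mp hk
  have hksne : PySem.List.sorted (PySem.Set.ofList coins) (fun x => x) false ≠ [] := by
    intro hcn
    exact hSne ((PySem.List.sorted_eq_nil_iff _ _ _).mp hcn)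
  unfold visualize_old_alt pvCanon
  dsimp only
  rw [PySem.Dict.keys_counter, hmx]
  dsimp only
  simp only [PySem.Dict.getD_counter]
  set ks := PySem.List.sorted (PySem.Set.ofList coins) (fun x => x) false with hks
  set bar := bar_char.toList with hbar
  have hzip : pvZipT (ks.map (fun den =>
        List.replicate (mx - ((coins.count den : Nat) : Int)).toNat [' ', ' ']
          ++ [PySem.Int.toChars ((coins.count den : Nat) : Int) ++ [' ']]
          ++ List.replicate ((coins.count den : Nat) : Int).toNat (bar ++ bar)))
      = (List.range (mx + 1).toNat).map (fun r =>
          ks.map (fun den => pvEntry bar mx ((coins.count den : Nat) : Int) r)) := by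
    rw [pvZipT_eq (mx + 1).toNat _ (by simpa using hksne) (by
      intro c hcm
      obtain ⟨den, hden, rfl⟩ := List.mem_map.mp hcm
      exact colB_length bar mx _ (by have := hc1 den (hksmem den hden); omega)
        (hcmx den (hksmem den hden)))]
    apply List.map_congr_left
    intro r hr
    rw [List.map_map]
    apply List.map_congr_left
    intro den hden
    rw [Function.comp_apply,
      colB_getD bar mx _ (by have := hc1 den (hksmem den hden); omega)
        (hcmx den (hksmem den hden)) r,
      if_pos (List.mem_range.mp hr)]
  rw [hzip, List.map_map]
  rfl

theorem pv_main (coins : List Int) (bar_char : String) (h : coins ≠ []) :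
    visualize_old coins bar_char = visualize_old_alt coins bar_char := by
  have hSne : PySem.Set.ofList coins ≠ [] := by
    cases coins with
    | nil => exact absurd rfl h
    | cons c cs =>
      intro hc
      have : c ∈ PySem.Set.ofList (c :: cs) := (PySem.Set.mem_ofList _ _).mpr List.mem_cons_self
      rw [hc] at this
      cases this
  obtain ⟨mx, hmx⟩ : ∃ mx, PySem.List.max? (PySem.Dict.counter coins).values (fun x => x)
      = some mx := by
    cases hcase : PySem.List.max? (PySem.Dict.counter coins).values (fun x => x) with
    | some m => exact ⟨m, rfl⟩
    | none =>
      rw [PySem.List.max?_eq_none_iff] at hcase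
      have hvals : (PySem.Dict.counter coins).values
          = (PySem.Set.ofList coins).map (fun k => ((coins.count k : Nat) : Int)) := by
        have := PySem.Dict.values_eq_map_keys (PySem.Dict.counter coins)
          (PySem.Dict.nodup_keys_counter coins) (0 : Int)
        rw [this, PySem.Dict.keys_counter]
        exact List.map_congr_left (fun k _ => PySem.Dict.getD_counter coins k)
      rw [hvals] at hcase
      exact absurd (List.map_eq_nil_iff.mp hcase) hSne
  rw [pv_A_canon coins bar_char h mx hmx, pv_B_canon coins bar_char h mx hmx]

-- ===== VERDICT (by name: the statement is the Claim_ definition above) =====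
theorem visualize_old_spec : Claim_equal_visualize_old := by
  intro coins bar_char _ hpre
  unfold Spec_visualize_old
  exact pv_main coins bar_char hpre
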